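-- pv_equiv track=rewrite | github.com/howshowwin/Picture-to-character-art | frontend/simple-decoder.py | decode_from_string
-- ===== SOURCE A (Python) =====
-- def decode_ultra_minimal(compressed_data, width, height):
--     """
--     解碼極簡格式的字符藝術
--
--     Args:
--         compressed_data: dict, 格式為 {"字符": [位置1, 位置2, ...]}
--         width: int, 圖像寬度
--         height: int, 圖像高度
--
--     Returns:
--         list of str, 每個元素是一行字符
--     """
--     # 初始化空白圖像
--     result = [[' ' for _ in range(width)] for _ in range(height)]
--
--     # 填入字符
--     for char, positions in compressed_data.items():
--         for pos in positions:
--             row = pos // width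
--             col = pos % width
--             if 0 <= row < height and 0 <= col < width:
--                 result[row][col] = char
--
--     # 轉換為字串陣列
--     return [''.join(row) for row in result]
--
-- def decode_from_string(compressed_string, width, height):
--     """
--     從字串格式解碼
--     格式: "字符:位置1,位置2;字符:位置1,位置2"
--     """
--     data = {}
--     if compressed_string:
--         parts = compressed_string.split(';')
--         for part in parts:
--             if ':' in part:
--                 char, positions_str = part.split(':', 1)
--                 positions = [int(p) for p in positions_str.split(',') if p]
--                 data[char] = positions
--
--     return decode_ultra_minimal(data, width, height)
-- ===== SOURCE B (Python) =====
-- def decode_from_string(compressed_string, width, height):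
--     # parse "char:p1,p2;char:..." exactly like the original (it is the input format)
--     data = {}
--     if compressed_string:
--         for part in compressed_string.split(';'):
--             if ':' in part:
--                 char, positions_str = part.split(':', 1)
--                 data[char] = [int(p) for p in positions_str.split(',') if p]
--     # sparse mapping: position -> character last written there (same write order as A)
--     cell = {}
--     for char, positions in data.items():
--         for pos in positions:
--             cell[pos] = char
--     # pull each output cell from the mapping; only indices 0..width*height-1 are
--     # queried, so no divmod and no bound checks are needed anywhere
--     return [''.join(cell.get(r * width + c, ' ') for c in range(width))
--             for r in range(height)]
-- ===== Notes on version B (the rewrite author's own statement) =====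
-- stated objective: alternative
-- what changed: B drops the dense 2D canvas entirely: instead of pushing each position into a preallocated list-of-lists via divmod row/col arithmetic with a four-way bound guard, it records writes in a sparse dict position->char with no arithmetic or guards at all, and then pulls every output cell by direct lookup cell.get(r*width+c, ' ') while generating the rows.
import Mathlib
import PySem

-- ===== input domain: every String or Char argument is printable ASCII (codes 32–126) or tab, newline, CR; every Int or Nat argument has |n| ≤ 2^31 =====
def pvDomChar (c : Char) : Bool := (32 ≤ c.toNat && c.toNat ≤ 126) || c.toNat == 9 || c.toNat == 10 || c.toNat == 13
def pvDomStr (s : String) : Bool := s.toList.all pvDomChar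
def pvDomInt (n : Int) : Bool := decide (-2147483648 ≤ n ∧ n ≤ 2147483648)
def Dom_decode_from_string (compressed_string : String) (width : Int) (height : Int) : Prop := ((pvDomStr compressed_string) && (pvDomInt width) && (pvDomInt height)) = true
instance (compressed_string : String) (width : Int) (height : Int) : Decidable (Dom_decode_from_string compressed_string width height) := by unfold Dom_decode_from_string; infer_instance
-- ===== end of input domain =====

-- B drops A's dense 2D canvas (divmod indexing + four-way bound guard) for a sparse dict
-- position→char written without any guards, and pulls each output cell by direct lookup
-- while generating the rows (objective: alternative; same asymptotic cost).

-- shared parsing helper: Python "char:p1,p2;char:..." → dict {char: [positions]} (both A and B parse this way;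
-- int(p) is PySem.Int.ofStr?; `.getD 0` is only reached where int(p) would raise ValueError, excluded by Pre_)
def pvParse (compressed_string : String) : PySem.Dict String (List Int) :=
  if compressed_string ≠ "" then
    ((PySem.Str.split? compressed_string ";").getD []).foldl (fun data part =>
      if PySem.Str.isIn ":" part then
        match PySem.Str.splitMax? part ":" 1 with
        | some (char :: positions_str :: _) =>
            data.insert char
              ((((PySem.Str.split? positions_str ",").getD []).filter (fun p => p ≠ "")).map
                (fun p => (PySem.Int.ofStr? p).getD 0))
        | _ => data
      else data) PySem.Dict.empty
  else PySem.Dict.empty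

-- ===== PORT A =====
def decode_ultra_minimal (compressed_data : PySem.Dict String (List Int)) (width : Int) (height : Int) : List String :=
  -- the nested comprehension builds one fresh width-row per range step (so height = 0 never touches width)
  let result := (List.range height.toNat).map (fun _ => List.replicate width.toNat " ")
  let result := compressed_data.items.foldl (fun res cp =>
    cp.2.foldl (fun res pos =>
      let row := PySem.Int.floordiv pos width
      let col := PySem.Int.mod pos width
      if 0 ≤ row ∧ row < height ∧ 0 ≤ col ∧ col < width then
        res.set row.toNat ((res.getD row.toNat []).set col.toNat cp.1)
      else res) res) result
  result.map (fun row => PySem.Str.join "" row)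

def decode_from_string (compressed_string : String) (width : Int) (height : Int) : List String :=
  decode_ultra_minimal (pvParse compressed_string) width height

-- ===== PORT B =====
def decode_from_string_alt (compressed_string : String) (width : Int) (height : Int) : List String :=
  let data := pvParse compressed_string
  let cell : PySem.Dict Int String := data.items.foldl (fun cl cp =>
    cp.2.foldl (fun cl pos => cl.insert pos cp.1) cl) PySem.Dict.empty
  (PySem.List.pyRange 0 height).map (fun r =>
    PySem.Str.join "" ((PySem.List.pyRange 0 width).map (fun c => cell.getD (r * width + c) " ")))

-- ===== PRECONDITION & SPEC =====
-- the position substrings the Python parse feeds to int(): nonempty comma-pieces after the first ':' of each ';'-part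
def pvSegs (compressed_string : String) : List String :=
  if compressed_string ≠ "" then
    ((PySem.Str.split? compressed_string ";").getD []).flatMap (fun part =>
      if PySem.Str.isIn ":" part then
        match PySem.Str.splitMax? part ":" 1 with
        | some (_ :: positions_str :: _) =>
            ((PySem.Str.split? positions_str ",").getD []).filter (fun p => p ≠ "")
        | _ => []
      else [])
  else []

-- Pre_ excludes exactly the inputs where A raises: a position substring int() rejects (ValueError),
-- and width = 0 with some position left in the final parsed dict (ZeroDivisionError at pos // width).
def Pre_decode_from_string (compressed_string : String) (width : Int) (height : Int) : Prop :=
  (∀ p ∈ pvSegs compressed_string, (PySem.Int.ofStr? p).isSome) ∧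
  (width = 0 → ∀ ps ∈ (pvParse compressed_string).values, ps = [])

instance (compressed_string : String) (width : Int) (height : Int) : Decidable (Pre_decode_from_string compressed_string width height) := by unfold Pre_decode_from_string; infer_instance

def pvWitness_decode_from_string : String × Int × Int := ("A:0,3;B:1", 3, 2)

def Spec_decode_from_string (compressed_string : String) (width : Int) (height : Int) (out : List String) : Prop := out = decode_from_string_alt compressed_string width height
instance (compressed_string : String) (width : Int) (height : Int) (out : List String) : Decidable (Spec_decode_from_string compressed_string width height out) := by unfold Spec_decode_from_string; infer_instance

-- ===== CLAIM (what is proved, stated in full; the proofs are below) =====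
def Claim_equal_decode_from_string : Prop := ∀ (compressed_string : String) (width : Int) (height : Int), Dom_decode_from_string compressed_string width height → Pre_decode_from_string compressed_string width height → Spec_decode_from_string compressed_string width height (decode_from_string compressed_string width height)


-- ===== LEMMAS AND PROOFS =====

theorem pv_foldl_id {α β : Type} (f : α → β → α) (x : α) (hf : ∀ b, f x b = x) (l : List β) :
    l.foldl f x = x := by
  induction l with
  | nil => rfl
  | cons b tl ih => rw [List.foldl_cons, hf b, ih]

theorem pv_map_getD_range (g : List (List String)) (f : List String → String) :
    (List.range g.length).map (fun r => f (g.getD r [])) = g.map f := by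
  induction g with
  | nil => simp
  | cons a tl ih =>
    rw [List.length_cons, List.range_succ_eq_map, List.map_cons, List.map_map]
    simpa using ih

theorem pv_row_eq (xs : List String) (n : Nat) (hl : xs.length = n) :
    (List.range n).map (fun c => xs.getD c " ") = xs := by
  apply List.ext_getElem
  · simp [hl]
  · intro i h1 h2
    simp only [List.getElem_map, List.getElem_range]
    exact List.getD_eq_getElem xs " " (by omega)

-- one write: A's guarded canvas write and B's unguarded dict insert preserve the cellwise relation
theorem pv_step (w h : Int) (hw : 0 < w) (hh : 0 < h) (ch : String) (pos : Int)
    (g : List (List String)) (cell : PySem.Dict Int String)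
    (hlen : g.length = h.toNat) (hrows : ∀ r ∈ g, r.length = w.toNat)
    (hinv : ∀ r c : Nat, r < h.toNat → c < w.toNat →
      (g.getD r []).getD c " " = cell.getD ((r : Int) * w + (c : Int)) " ") :
    (let row := PySem.Int.floordiv pos w
     let col := PySem.Int.mod pos w
     let g' := if 0 ≤ row ∧ row < h ∧ 0 ≤ col ∧ col < w then
        g.set row.toNat ((g.getD row.toNat []).set col.toNat ch) else g
     g'.length = h.toNat ∧ (∀ r ∈ g', r.length = w.toNat) ∧
       ∀ r c : Nat, r < h.toNat → c < w.toNat →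
         (g'.getD r []).getD c " " = (cell.insert pos ch).getD ((r : Int) * w + (c : Int)) " ") := by
  intro row col g'
  have hcol0 : 0 ≤ col := PySem.Int.mod_nonneg pos hw
  have hcolw : col < w := PySem.Int.mod_lt pos hw
  have hsum : row * w + col = pos := PySem.Int.floordiv_mul_add_mod pos w
  have hlen' : g'.length = h.toNat := by
    by_cases hgd : 0 ≤ row ∧ row < h ∧ 0 ≤ col ∧ col < w
    · simp [g', if_pos hgd, hlen]
    · simp [g', if_neg hgd, hlen]
  have hrows' : ∀ r ∈ g', r.length = w.toNat := by
    by_cases hgd : 0 ≤ row ∧ row < h ∧ 0 ≤ col ∧ col < w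
    · simp only [g', if_pos hgd]
      intro r hr
      rcases List.mem_or_eq_of_mem_set hr with h1 | h1
      · exact hrows r h1
      · subst h1
        have hR : row.toNat < g.length := by rw [hlen]; omega
        rw [List.length_set, List.getD_eq_getElem g [] hR]
        exact hrows _ (List.getElem_mem hR)
    · simp only [g', if_neg hgd]; exact hrows
  refine ⟨hlen', hrows', ?_⟩
  intro r c hr hc
  have hrowlen : (g.getD r []).length = w.toNat := by
    have hR : r < g.length := by rw [hlen]; exact hr
    rw [List.getD_eq_getElem g [] hR]
    exact hrows _ (List.getElem_mem hR)
  rw [PySem.Dict.getD_insert]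
  by_cases hpe : (r : Int) * w + (c : Int) = pos
  · rw [if_pos hpe]
    have hrow_eq : row = (r : Int) := by
      rw [PySem.Int.floordiv_eq_iff_of_pos hw]
      refine ⟨by rw [← hpe]; omega, by rw [← hpe, add_mul, one_mul]; omega⟩
    have hcol_eq : col = (c : Int) := by
      have := hsum; rw [hrow_eq] at this; linarith [hpe, this]
    have hguard : 0 ≤ row ∧ row < h ∧ 0 ≤ col ∧ col < w := by
      refine ⟨by omega, by rw [hrow_eq]; omega, hcol0, hcolw⟩
    have hrn : row.toNat = r := by rw [hrow_eq]; exact Int.toNat_natCast r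
    have hcn : col.toNat = c := by rw [hcol_eq]; exact Int.toNat_natCast c
    simp only [g', if_pos hguard, hrn, hcn]
    have h1 : (g.set r ((g.getD r []).set c ch)).getD r [] = (g.getD r []).set c ch := by
      rw [List.getD_eq_getElem _ [] (by rw [List.length_set, hlen]; exact hr)]
      exact List.getElem_set_self _
    have h2 : ((g.getD r []).set c ch).getD c " " = ch := by
      rw [List.getD_eq_getElem _ " " (by rw [List.length_set, hrowlen]; exact hc)]
      exact List.getElem_set_self _
    rw [h1, h2]
  · rw [if_neg hpe]
    by_cases hgd : 0 ≤ row ∧ row < h ∧ 0 ≤ col ∧ col < w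
    · -- the write lands at a different cell (row.toNat, col.toNat) ≠ (r, c)
      have hne : ¬ (row.toNat = r ∧ col.toNat = c) := by
        rintro ⟨h1, h2⟩
        apply hpe
        rw [← hsum, ← h1, ← h2, Int.toNat_of_nonneg hgd.1, Int.toNat_of_nonneg hgd.2.2.1]
      simp only [g', if_pos hgd]
      rw [← hinv r c hr hc]
      have hR : r < g.length := by rw [hlen]; exact hr
      by_cases hre : row.toNat = r
      · have hce : col.toNat ≠ c := fun hcc => hne ⟨hre, hcc⟩
        have h1 : (g.set row.toNat ((g.getD row.toNat []).set col.toNat ch)).getD r []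
            = (g.getD r []).set col.toNat ch := by
          rw [hre, List.getD_eq_getElem _ [] (by rw [List.length_set, hlen]; exact hr)]
          exact List.getElem_set_self _
        have h2 : ((g.getD r []).set col.toNat ch).getD c " " = (g.getD r []).getD c " " := by
          rw [List.getD_eq_getElem _ " " (by rw [List.length_set, hrowlen]; exact hc),
              List.getD_eq_getElem _ " " (by rw [hrowlen]; exact hc)]
          exact List.getElem_set_ne hce _
        rw [h1, h2]
      · have h1 : (g.set row.toNat ((g.getD row.toNat []).set col.toNat ch)).getD r []
            = g.getD r [] := by
          rw [List.getD_eq_getElem _ [] (by rw [List.length_set, hlen]; exact hr),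
              List.getD_eq_getElem g [] hR]
          exact List.getElem_set_ne hre _
        rw [h1]
    · simp only [g', if_neg hgd]
      exact hinv r c hr hc

theorem pv_inner (w h : Int) (hw : 0 < w) (hh : 0 < h) (ch : String) (ps : List Int)
    (g : List (List String)) (cell : PySem.Dict Int String)
    (hlen : g.length = h.toNat) (hrows : ∀ r ∈ g, r.length = w.toNat)
    (hinv : ∀ r c : Nat, r < h.toNat → c < w.toNat →
      (g.getD r []).getD c " " = cell.getD ((r : Int) * w + (c : Int)) " ") :
    (let g' := ps.foldl (fun res pos =>
        let row := PySem.Int.floordiv pos w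
        let col := PySem.Int.mod pos w
        if 0 ≤ row ∧ row < h ∧ 0 ≤ col ∧ col < w then
          res.set row.toNat ((res.getD row.toNat []).set col.toNat ch) else res) g
     let cell' := ps.foldl (fun cl pos => cl.insert pos ch) cell
     g'.length = h.toNat ∧ (∀ r ∈ g', r.length = w.toNat) ∧
       ∀ r c : Nat, r < h.toNat → c < w.toNat →
         (g'.getD r []).getD c " " = cell'.getD ((r : Int) * w + (c : Int)) " ") := by
  induction ps generalizing g cell with
  | nil => exact ⟨hlen, hrows, hinv⟩
  | cons p tl ih =>
    obtain ⟨e1, e2, e3⟩ := pv_step w h hw hh ch p g cell hlen hrows hinv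
    simp only [List.foldl_cons]
    exact ih _ _ e1 e2 e3

theorem pv_outer (w h : Int) (hw : 0 < w) (hh : 0 < h) (l : List (String × List Int))
    (g : List (List String)) (cell : PySem.Dict Int String)
    (hlen : g.length = h.toNat) (hrows : ∀ r ∈ g, r.length = w.toNat)
    (hinv : ∀ r c : Nat, r < h.toNat → c < w.toNat →
      (g.getD r []).getD c " " = cell.getD ((r : Int) * w + (c : Int)) " ") :
    (let g' := l.foldl (fun res cp => cp.2.foldl (fun res pos =>
        let row := PySem.Int.floordiv pos w
        let col := PySem.Int.mod pos w
        if 0 ≤ row ∧ row < h ∧ 0 ≤ col ∧ col < w then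
          res.set row.toNat ((res.getD row.toNat []).set col.toNat cp.1) else res) res) g
     let cell' := l.foldl (fun cl cp => cp.2.foldl (fun cl pos => cl.insert pos cp.1) cl) cell
     g'.length = h.toNat ∧ (∀ r ∈ g', r.length = w.toNat) ∧
       ∀ r c : Nat, r < h.toNat → c < w.toNat →
         (g'.getD r []).getD c " " = cell'.getD ((r : Int) * w + (c : Int)) " ") := by
  induction l generalizing g cell with
  | nil => exact ⟨hlen, hrows, hinv⟩
  | cons cp tl ih =>
    obtain ⟨e1, e2, e3⟩ := pv_inner w h hw hh cp.1 cp.2 g cell hlen hrows hinv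
    simp only [List.foldl_cons]
    exact ih _ _ e1 e2 e3

theorem pv_main_core (data : PySem.Dict String (List Int)) (w h : Int) :
    (let result := List.replicate h.toNat (List.replicate w.toNat " ")
     let result := data.items.foldl (fun res cp =>
       cp.2.foldl (fun res pos =>
         let row := PySem.Int.floordiv pos w
         let col := PySem.Int.mod pos w
         if 0 ≤ row ∧ row < h ∧ 0 ≤ col ∧ col < w then
           res.set row.toNat ((res.getD row.toNat []).set col.toNat cp.1)
         else res) res) result
     result.map (fun row => PySem.Str.join "" row)) =
    (let cell : PySem.Dict Int String := data.items.foldl (fun cl cp =>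
       cp.2.foldl (fun cl pos => cl.insert pos cp.1) cl) PySem.Dict.empty
     (PySem.List.pyRange 0 h).map (fun r =>
       PySem.Str.join "" ((PySem.List.pyRange 0 w).map (fun c => cell.getD (r * w + c) " ")))) := by
  by_cases hh : 0 < h
  · by_cases hw : 0 < w
    · -- main case: the cellwise invariant carried through both folds
      have hg0len : (List.replicate h.toNat (List.replicate w.toNat " ")).length = h.toNat := by simp
      have hg0rows : ∀ r ∈ List.replicate h.toNat (List.replicate w.toNat " "), r.length = w.toNat := by
        intro r hr; rw [List.eq_of_mem_replicate hr]; simp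
      have hg0inv : ∀ r c : Nat, r < h.toNat → c < w.toNat →
          ((List.replicate h.toNat (List.replicate w.toNat " ")).getD r []).getD c " "
            = (PySem.Dict.empty : PySem.Dict Int String).getD ((r : Int) * w + (c : Int)) " " := by
        intro r c hr hc
        rw [PySem.Dict.getD_empty, List.getD_eq_getElem _ [] (by simpa using hr)]
        simp only [List.getElem_replicate]
        rw [List.getD_eq_getElem _ " " (by simpa using hc)]
        simp
      obtain ⟨e1, e2, e3⟩ := pv_outer w h hw hh data.items _ _ hg0len hg0rows hg0inv
      simp only []
      set g' := data.items.foldl _ (List.replicate h.toNat (List.replicate w.toNat " ")) with hgdef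
      set cell' := data.items.foldl _ (PySem.Dict.empty : PySem.Dict Int String) with hcdef
      have hH : h = ((h.toNat : Nat) : Int) := (Int.toNat_of_nonneg (le_of_lt hh)).symm
      have hW : w = ((w.toNat : Nat) : Int) := (Int.toNat_of_nonneg (le_of_lt hw)).symm
      rw [← pv_map_getD_range g' (fun row => PySem.Str.join "" row), e1]
      conv_rhs => rw [hH]
      rw [PySem.List.pyRange_zero_natCast, List.map_map]
      apply List.map_congr_left
      intro k hk
      have hk' : k < h.toNat := List.mem_range.mp hk
      simp only [Function.comp]
      congr 1
      conv_rhs => rw [hW]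
      rw [PySem.List.pyRange_zero_natCast, List.map_map]
      rw [← pv_row_eq (g'.getD k []) w.toNat (by
        rw [List.getD_eq_getElem g' [] (by rw [e1]; exact hk')]
        exact e2 _ (List.getElem_mem _))]
      apply List.map_congr_left
      intro c hc
      have hc' : c < w.toNat := List.mem_range.mp hc
      simp only [Function.comp]
      rw [← hW]
      exact e3 k c hk' hc'
    · -- 0 < h, w ≤ 0 : A's guard never fires and B's inner range is empty — h empty rows on both sides
      have hWz : w.toNat = 0 := by omega
      have hA : ∀ (l : List (String × List Int)) (g : List (List String)),
          l.foldl (fun res cp => cp.2.foldl (fun res pos =>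
            let row := PySem.Int.floordiv pos w
            let col := PySem.Int.mod pos w
            if 0 ≤ row ∧ row < h ∧ 0 ≤ col ∧ col < w then
              res.set row.toNat ((res.getD row.toNat []).set col.toNat cp.1)
            else res) res) g = g := fun l g =>
        pv_foldl_id _ g (fun cp => pv_foldl_id _ g (fun pos => if_neg (fun hc => by omega)) cp.2) l
      simp only []
      rw [hA, hWz]
      have hH : h = ((h.toNat : Nat) : Int) := (Int.toNat_of_nonneg (le_of_lt hh)).symm
      have hwr : PySem.List.pyRange 0 w = [] := by
        rw [PySem.List.pyRange_one]
        have h0 : (w - 0).toNat = 0 := by omega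
        simp only [h0, List.range_zero, List.map_nil]
      rw [hH, PySem.List.pyRange_zero_natCast, List.map_map, hwr]
      simp only [List.map_nil, Function.comp_def, List.map_const', List.length_range]
      simp [PySem.Str.join]
      omega
  · -- h ≤ 0 : both sides empty
    have hHz : h.toNat = 0 := by omega
    have hpr : PySem.List.pyRange 0 h = [] := by
      rw [PySem.List.pyRange_one]
      have h0 : (h - 0).toNat = 0 := by omega
      simp only [h0, List.range_zero, List.map_nil]
    simp only [hHz, List.replicate_zero, hpr, List.map_nil]
    rw [pv_foldl_id _ _ (fun cp => pv_foldl_id _ _ (fun pos => by simp) cp.2)]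
    simp

-- ===== VERDICT (by name: the statement is the Claim_ definition above) =====
theorem decode_from_string_spec : Claim_equal_decode_from_string := by
  intro s w h _ _
  unfold Spec_decode_from_string decode_from_string decode_ultra_minimal decode_from_string_alt
  simp only [List.map_const', List.length_range]
  exact pv_main_core (pvParse s) w h
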